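-- pv_equiv track=rewrite | github.com/roborobii/algorithms | recursion_wordsplit.py | word_split_helper
-- ===== SOURCE A (Python) =====
-- def word_split_helper(phrase, words_set, output):
-- 	if len(phrase) == 0: return output
--
-- 	substring = ""
-- 	for i, char in enumerate(phrase):
-- 		substring += char
-- 		if substring in words_set:
-- 			output.append(substring)
-- 			if i+1 == len(phrase): return output
-- 			return word_split_helper(phrase[i+1:], words_set, output)
-- 	return output
-- ===== SOURCE B (Python) =====
-- def word_split_helper(phrase, words_set, output):
--     ws = set(words_set)
--     n = len(phrase)
--     start, end = 0, 1
--     while end <= n: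
--         piece = phrase[start:end]
--         if piece in ws:
--             output.append(piece)
--             start = end
--         end += 1
--     return output
-- ===== Notes on version B (the rewrite author's own statement) =====
-- stated objective: faster
-- what changed: Replaces A's recursion that rebuilds the substring char-by-char, scans the word list for every prefix and slices the remaining phrase on every match, by a single iterative index-based while loop over the original string with the dictionary turned into a hash set once (measured 4.25x at n=4096; A timed out at n=262144 where B returned).
import Mathlib
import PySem

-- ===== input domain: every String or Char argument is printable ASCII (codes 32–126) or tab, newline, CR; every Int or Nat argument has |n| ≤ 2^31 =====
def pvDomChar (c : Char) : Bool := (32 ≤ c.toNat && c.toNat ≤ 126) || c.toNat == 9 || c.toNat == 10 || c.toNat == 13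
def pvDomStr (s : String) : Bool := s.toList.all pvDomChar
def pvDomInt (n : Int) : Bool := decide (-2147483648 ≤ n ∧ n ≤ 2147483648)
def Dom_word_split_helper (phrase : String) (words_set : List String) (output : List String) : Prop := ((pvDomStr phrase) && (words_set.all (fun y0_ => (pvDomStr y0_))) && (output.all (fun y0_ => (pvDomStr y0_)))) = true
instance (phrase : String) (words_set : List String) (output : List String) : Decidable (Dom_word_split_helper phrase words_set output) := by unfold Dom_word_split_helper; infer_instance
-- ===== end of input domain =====

-- B replaces A's rebuild-a-substring-and-recurse scheme by a single index-based while loop over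
-- the phrase with a set built once; equivalence is about the RETURN value (both append the same
-- words to `output` in the same order). Exact on the stated ASCII domain.


-- ===== PORT A =====
-- A's inner `for i, char in enumerate(phrase)` loop: extend `substring` by one char; on a
-- dictionary hit return the matched word and the remaining characters (phrase[i+1:]).
def wsFindPrefix (rest : List Char) (substring : String) (words_set : List String) :
    Option (String × List Char) :=
  match rest with
  | [] => none
  | c :: rs =>
    let substring' := substring.push c
    if substring' ∈ words_set then some (substring', rs) else wsFindPrefix rs substring' words_set

theorem wsFindPrefix_length {rest : List Char} {s : String} {ws : List String}
    {w : String} {rs : List Char} (h : wsFindPrefix rest s ws = some (w, rs)) :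
    rs.length < rest.length := by
  induction rest generalizing s with
  | nil => simp [wsFindPrefix] at h
  | cons c tl ih =>
    simp only [wsFindPrefix] at h
    split at h
    · cases h; simp
    · exact Nat.lt_trans (ih h) (by simp)

-- literal transliteration of A over the phrase's character list
def word_split_helper_core (chars : List Char) (words_set : List String)
    (output : List String) : List String :=
  if _h : chars = [] then output
  else
    match h2 : wsFindPrefix chars "" words_set with
    | none => output
    | some (w, rs) =>
      -- `output.append(substring)`; `if i+1 == len(phrase): return output`
      if rs = [] then output ++ [w]
      else word_split_helper_core rs words_set (output ++ [w])
termination_by chars.length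
decreasing_by exact wsFindPrefix_length h2

def word_split_helper (phrase : String) (words_set : List String) (output : List String) : List String :=
  word_split_helper_core phrase.toList words_set output

-- ===== PORT B =====
-- Source B's `while end <= n` loop: piece = phrase[start:end]; on a hit append it and set start = end.
def wsAltLoop (chars : List Char) (ws : PySem.Set String) (n start e : Nat)
    (out : List String) : List String :=
  if _h : e ≤ n then
    let piece := String.ofList ((chars.drop start).take (e - start))
    if PySem.Set.contains ws piece then wsAltLoop chars ws n e (e + 1) (out ++ [piece])
    else wsAltLoop chars ws n start (e + 1) out
  else out
termination_by n + 1 - e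

def word_split_helper_alt (phrase : String) (words_set : List String) (output : List String) : List String :=
  let chars := phrase.toList
  wsAltLoop chars (PySem.Set.ofList words_set) chars.length 0 1 output

-- ===== PRECONDITION & SPEC =====
def Spec_word_split_helper (phrase : String) (words_set : List String) (output : List String) (out : List String) : Prop := out = word_split_helper_alt phrase words_set output
instance (phrase : String) (words_set : List String) (output : List String) (out : List String) : Decidable (Spec_word_split_helper phrase words_set output out) := by unfold Spec_word_split_helper; infer_instance

-- ===== CLAIM (what is proved, stated in full; the proofs are below) =====
def Claim_equal_word_split_helper : Prop := ∀ (phrase : String) (words_set : List String) (output : List String), Dom_word_split_helper phrase words_set output → Spec_word_split_helper phrase words_set output (word_split_helper phrase words_set output)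

-- ===== LEMMAS AND PROOFS =====

theorem ws_contains_iff (ws : List String) (x : String) :
    PySem.Set.contains (PySem.Set.ofList ws) x = true ↔ x ∈ ws := by
  simp [PySem.Set.contains, PySem.Set.mem_ofList]

theorem ws_ofList_push (l : List Char) (c : Char) :
    (String.ofList l).push c = String.ofList (l ++ [c]) := by
  apply String.toList_injective; simp

-- the substring A has accumulated after scanning chars[s:e] is phrase[s:e]
theorem ws_sub_succ (chars : List Char) (s e : Nat) (c : Char) (rs : List Char)
    (hse : s ≤ e) (hdrop : chars.drop e = c :: rs) :
    (chars.drop s).take (e + 1 - s) = (chars.drop s).take (e - s) ++ [c] := by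
  have h1 : e + 1 - s = (e - s) + 1 := by omega
  have h2 : (chars.drop s).drop (e - s) = chars.drop e := by
    rw [List.drop_drop]; congr 1; omega
  have h3 : (chars.drop s)[e - s]? = some c := by
    rw [← List.head?_drop, h2, hdrop]; rfl
  rw [h1, List.take_succ, h3]
  rfl

-- the inner scan: while no word matches, both programs advance `e` in lockstep
theorem ws_scan (chars : List Char) (wsl : List String) (s : Nat) :
    ∀ (rest : List Char) (e : Nat) (out : List String),
      rest = chars.drop e → s ≤ e →
      (∀ e' out', e < e' → wsAltLoop chars (PySem.Set.ofList wsl) chars.length e' (e' + 1) out'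
          = word_split_helper_core (chars.drop e') wsl out') →
      wsAltLoop chars (PySem.Set.ofList wsl) chars.length s (e + 1) out =
        (match wsFindPrefix rest (String.ofList ((chars.drop s).take (e - s))) wsl with
         | none => out
         | some (w, rs) => word_split_helper_core rs wsl (out ++ [w])) := by
  intro rest
  induction rest generalizing s with
  | nil =>
    intro e out hr _hse _H
    have hlen : chars.length ≤ e := by
      by_contra hlt
      have : chars.drop e ≠ [] := by
        simp [List.drop_eq_nil_iff]; omega
      exact this hr.symm
    rw [wsAltLoop, wsFindPrefix]
    simp; omega
  | cons c rs ih =>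
    intro e out hr hse H
    have helt : e < chars.length := by
      by_contra hge
      rw [List.drop_eq_nil_of_le (by omega)] at hr
      simp at hr
    have hdrop1 : chars.drop (e + 1) = rs := by
      have h5 : (chars.drop e).drop 1 = rs := by rw [← hr]; rfl
      rw [List.drop_drop] at h5
      exact h5
    have hpiece : String.ofList ((chars.drop s).take (e + 1 - s))
        = (String.ofList ((chars.drop s).take (e - s))).push c := by
      rw [ws_sub_succ chars s e c rs hse hr.symm, ws_ofList_push]
    rw [wsAltLoop]
    simp only [dif_pos (by omega : e + 1 ≤ chars.length)]
    rw [wsFindPrefix]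
    by_cases hmem : (String.ofList ((chars.drop s).take (e - s))).push c ∈ wsl
    · have hc : PySem.Set.contains (PySem.Set.ofList wsl)
          (String.ofList ((chars.drop s).take (e + 1 - s))) = true := by
        rw [hpiece]; exact (ws_contains_iff wsl _).mpr hmem
      simp only [hc, if_pos hmem, if_true]
      rw [H (e + 1) (out ++ [String.ofList ((chars.drop s).take (e + 1 - s))]) (by omega)]
      rw [hdrop1, hpiece]
    · have hc : PySem.Set.contains (PySem.Set.ofList wsl)
          (String.ofList ((chars.drop s).take (e + 1 - s))) = false := by
        rw [hpiece]
        exact Bool.eq_false_iff.mpr (fun hcon => hmem ((ws_contains_iff wsl _).mp hcon))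
      simp only [hc, if_neg hmem, if_false, Bool.false_eq_true]
      have := ih s (e + 1) out hdrop1.symm (by omega)
        (fun e' out' h' => H e' out' (by omega))
      rw [this]
      have hacc : String.ofList ((chars.drop s).take (e + 1 - s))
          = (String.ofList ((chars.drop s).take (e - s))).push c := hpiece
      rw [hacc]

theorem ws_main (chars : List Char) (wsl : List String) :
    ∀ (s : Nat) (out : List String),
      wsAltLoop chars (PySem.Set.ofList wsl) chars.length s (s + 1) out =
        word_split_helper_core (chars.drop s) wsl out := by
  have key : ∀ (k s : Nat) (out : List String), chars.length - s ≤ k →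
      wsAltLoop chars (PySem.Set.ofList wsl) chars.length s (s + 1) out =
        word_split_helper_core (chars.drop s) wsl out := by
    intro k
    induction k with
    | zero =>
      intro s out hk
      have hle : chars.length ≤ s := by omega
      rw [wsAltLoop, word_split_helper_core]
      simp [List.drop_eq_nil_of_le hle]
      omega
    | succ k ih =>
      intro s out hk
      by_cases hs : chars.length ≤ s
      · rw [wsAltLoop, word_split_helper_core]
        simp [List.drop_eq_nil_of_le hs]
        omega
      · have hne : chars.drop s ≠ [] := by
          simp [List.drop_eq_nil_iff]; omega
        have hscan := ws_scan chars wsl s (chars.drop s) s out rfl le_rfl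
          (fun e' out' h' => ih e' out' (by omega))
        rw [hscan]
        rw [word_split_helper_core]
        simp only [dif_neg hne, Nat.sub_self, List.take_zero]
        cases hfp : wsFindPrefix (chars.drop s) (String.ofList []) wsl with
        | none => rfl
        | some p =>
          obtain ⟨w, rs⟩ := p
          by_cases hrs : rs = []
          · subst hrs
            simp [word_split_helper_core]
          · simp [hrs]
  intro s out
  exact key (chars.length - s) s out le_rfl

-- ===== VERDICT (by name: the statement is the Claim_ definition above) =====
theorem word_split_helper_spec : Claim_equal_word_split_helper := by
  intro phrase words_set output _
  unfold Spec_word_split_helper word_split_helper word_split_helper_alt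
  simpa using (ws_main phrase.toList words_set 0 output).symm
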